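-- pv_equiv track=rewrite | github.com/Pandonline/ADVENT_OF_CODE_2023 | Day11/Cosmic.py | truePosition
-- ===== SOURCE A (Python) =====
-- def truePosition(position,empty_line,empty_col) :
--     l = 0
--     for i in empty_line:
--         if i < position[0]:
--             l = l+1
--     c = 0
--     for i in empty_col:
--         if i < position[1]:
--             c = c+1
--
--     return (position[0]+l*999999,position[1]+c*999999)
-- ===== SOURCE B (Python) =====
-- def truePosition(position, empty_line, empty_col):
--     def count_less(vals, x):
--         # sort once, then binary search for the number of elements < x
--         s = sorted(vals)
--         lo, hi = 0, len(s)
--         while lo < hi: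
--             mid = (lo + hi) // 2
--             if s[mid] < x:
--                 lo = mid + 1
--             else:
--                 hi = mid
--         return lo
--     return (position[0] + count_less(empty_line, position[0]) * 999999,
--             position[1] + count_less(empty_col, position[1]) * 999999)
-- ===== Notes on version B (the rewrite author's own statement) =====
-- stated objective: alternative
-- what changed: Replaces the two linear counting loops by sort-then-binary-search: count_less sorts the list and locates the insertion point of the coordinate by bisection, which equals the number of smaller elements.
import Mathlib
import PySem

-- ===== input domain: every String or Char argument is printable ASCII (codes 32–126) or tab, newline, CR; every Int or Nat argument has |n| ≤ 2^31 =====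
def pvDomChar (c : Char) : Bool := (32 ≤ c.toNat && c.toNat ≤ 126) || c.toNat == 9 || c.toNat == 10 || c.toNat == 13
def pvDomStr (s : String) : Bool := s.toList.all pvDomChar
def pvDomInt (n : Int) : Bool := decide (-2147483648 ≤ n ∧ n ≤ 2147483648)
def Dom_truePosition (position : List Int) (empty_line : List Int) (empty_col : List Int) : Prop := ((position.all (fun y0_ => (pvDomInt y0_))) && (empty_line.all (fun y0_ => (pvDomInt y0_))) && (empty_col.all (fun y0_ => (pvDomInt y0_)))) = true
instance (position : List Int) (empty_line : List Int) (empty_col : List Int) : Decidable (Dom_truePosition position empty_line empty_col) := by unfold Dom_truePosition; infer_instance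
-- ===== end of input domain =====

-- B replaces A's two linear counting loops by sort-then-binary-search (same results; alternative algorithm, not faster).


-- ===== PORT A =====
-- position[0]/position[1] are in range on Pre_ (len ≥ 2), so the .getD 0 default is never taken there.
def truePosition (position : List Int) (empty_line : List Int) (empty_col : List Int) : List Int :=
  let l := empty_line.foldl (fun l i => if i < (PySem.List.pyGet? position 0).getD 0 then l + 1 else l) (0 : Int)
  let c := empty_col.foldl (fun c i => if i < (PySem.List.pyGet? position 1).getD 0 then c + 1 else c) (0 : Int)
  [(PySem.List.pyGet? position 0).getD 0 + l * 999999,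
   (PySem.List.pyGet? position 1).getD 0 + c * 999999]

-- ===== PORT B =====
-- the while-loop of count_less; s[mid] is always in range (lo < hi ≤ len), so .getD 0 is never taken
def bsearchLoop (s : List Int) (x : Int) (lo hi : Nat) : Nat :=
  if lo < hi then
    let mid := (lo + hi) / 2
    if s.getD mid 0 < x then bsearchLoop s x (mid + 1) hi
    else bsearchLoop s x lo mid
  else lo
termination_by hi - lo
decreasing_by all_goals omega

def countLess (vals : List Int) (x : Int) : Nat :=
  let s := PySem.List.sorted vals (fun v => v) false
  bsearchLoop s x 0 s.length

def truePosition_alt (position : List Int) (empty_line : List Int) (empty_col : List Int) : List Int :=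
  let p0 := (PySem.List.pyGet? position 0).getD 0
  let p1 := (PySem.List.pyGet? position 1).getD 0
  [p0 + (countLess empty_line p0 : Int) * 999999,
   p1 + (countLess empty_col p1 : Int) * 999999]

-- ===== PRECONDITION & SPEC =====
-- Pre_: the Python A raises IndexError (position[1], and position[0] if a loop runs) unless position has at least two elements.
def Pre_truePosition (position : List Int) (empty_line : List Int) (empty_col : List Int) : Prop :=
  2 ≤ position.length
instance (position : List Int) (empty_line : List Int) (empty_col : List Int) : Decidable (Pre_truePosition position empty_line empty_col) := by unfold Pre_truePosition; infer_instance
def pvWitness_truePosition : List Int × List Int × List Int := ([3, 5], [1, 4, 9], [2, 7])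

def Spec_truePosition (position : List Int) (empty_line : List Int) (empty_col : List Int) (out : List Int) : Prop := out = truePosition_alt position empty_line empty_col
instance (position : List Int) (empty_line : List Int) (empty_col : List Int) (out : List Int) : Decidable (Spec_truePosition position empty_line empty_col out) := by unfold Spec_truePosition; infer_instance

-- ===== CLAIM (what is proved, stated in full; the proofs are below) =====
def Claim_equal_truePosition : Prop := ∀ (position : List Int) (empty_line : List Int) (empty_col : List Int), Dom_truePosition position empty_line empty_col → Pre_truePosition position empty_line empty_col → Spec_truePosition position empty_line empty_col (truePosition position empty_line empty_col)

-- ===== LEMMAS AND PROOFS =====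

-- A's loop counts the elements below x
theorem foldl_count_lt (x : Int) (l : List Int) (c : Int) :
    l.foldl (fun c i => if i < x then c + 1 else c) c = c + (l.countP (fun i => decide (i < x)) : Int) := by
  induction l generalizing c with
  | nil => simp
  | cons a t ih =>
    simp only [List.foldl_cons, List.countP_cons, ih]
    by_cases h : a < x <;> simp [h] <;> push_cast <;> ring

-- In a ≤-sorted list, the elements below x are exactly the first countP-many
theorem sorted_lt_iff (s : List Int) (x : Int) (hs : s.Pairwise (· ≤ ·)) :
    ∀ i (h : i < s.length), (s[i] < x ↔ i < s.countP (fun a => decide (a < x))) := by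
  induction s with
  | nil => intro i h; simp at h
  | cons a t ih =>
    intro i h
    have ha : ∀ y ∈ t, a ≤ y := (List.pairwise_cons.mp hs).1
    have ht := ih (List.pairwise_cons.mp hs).2
    by_cases hax : a < x
    · cases i with
      | zero => simp [List.countP_cons, hax]
      | succ j =>
        have hj : j < t.length := by simpa using h
        have := ht j hj
        simp only [List.getElem_cons_succ, List.countP_cons, hax]
        simpa [Nat.succ_lt_succ_iff] using this
    · have htc : t.countP (fun a => decide (a < x)) = 0 := by
        rw [List.countP_eq_zero]
        intro y hy
        simp only [decide_eq_true_eq]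
        exact fun hlt => hax (lt_of_le_of_lt (ha y hy) hlt)
      cases i with
      | zero => simp [List.countP_cons, hax, htc]
      | succ j =>
        have hj : j < t.length := by simpa using h
        have := ht j hj
        simp only [List.getElem_cons_succ, List.countP_cons, hax, htc] at this ⊢
        simpa using this

theorem bsearchLoop_eq (s : List Int) (x : Int) (hs : s.Pairwise (· ≤ ·)) :
    ∀ n lo hi, hi - lo = n → lo ≤ s.countP (fun a => decide (a < x)) →
      s.countP (fun a => decide (a < x)) ≤ hi → hi ≤ s.length →
      bsearchLoop s x lo hi = s.countP (fun a => decide (a < x)) := by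
  intro n
  induction n using Nat.strong_induction_on with
  | _ n IH =>
    intro lo hi hn hlo hhi hlen
    rw [bsearchLoop]
    by_cases hlt : lo < hi
    · simp only [hlt, if_true]
      set cnt := s.countP (fun a => decide (a < x)) with hcnt
      set mid := (lo + hi) / 2 with hmid
      have hmlo : lo ≤ mid := by omega
      have hmhi : mid < hi := by omega
      have hmr : mid < s.length := by omega
      have hget : s.getD mid 0 = s[mid] := by
        simp [List.getD_eq_getElem?_getD, List.getElem?_eq_getElem hmr]
      rw [hget]
      have hchar := sorted_lt_iff s x hs mid hmr
      by_cases hc : s[mid] < x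
      · have hmc : mid < cnt := (hchar.mp hc)
        simp only [hc, if_true]
        exact IH (hi - (mid + 1)) (by omega) (mid + 1) hi rfl (by omega) hhi hlen
      · have hcm : cnt ≤ mid := by
          by_contra hlt2
          exact hc (hchar.mpr (by omega))
        simp only [hc, if_false]
        exact IH (mid - lo) (by omega) lo mid rfl hlo hcm (by omega)
    · simp only [hlt, if_false]
      omega

theorem countLess_eq (vals : List Int) (x : Int) :
    (countLess vals x : Nat) = vals.countP (fun a => decide (a < x)) := by
  unfold countLess
  set s := PySem.List.sorted vals (fun v => v) false with hsdef
  have hperm : s.Perm vals := PySem.List.sorted_perm vals (fun v => v) false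
  have hpw : s.Pairwise (· ≤ ·) := by
    simpa using PySem.List.sorted_pairwise vals (fun v => v)
  have hcnt : s.countP (fun a => decide (a < x)) = vals.countP (fun a => decide (a < x)) :=
    hperm.countP_eq _
  rw [bsearchLoop_eq s x hpw (s.length - 0) 0 s.length rfl (by omega)
      (by rw [hcnt, hperm.length_eq]; exact List.countP_le_length) le_rfl]
  exact hcnt

-- ===== VERDICT (by name: the statement is the Claim_ definition above) =====
theorem truePosition_spec : Claim_equal_truePosition := by
  intro position empty_line empty_col _ _
  show truePosition position empty_line empty_col = truePosition_alt position empty_line empty_col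
  simp only [truePosition, truePosition_alt, foldl_count_lt, countLess_eq]
  simp
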